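-- pv_equiv track=rewrite | github.com/pypi-data/pypi-mirror-386 | packages/ipfabric_netbox/ipfabric_netbox-4.3.1b1.tar.gz/ipfabric_netbox-4.3.1b1/ipfabric_netbox/utilities/nbutils.py | order_members
-- ===== SOURCE A (Python) =====
-- def order_members(members):
--     devices = {}
--
--     for member in members:
--         master_serial = member.get("sn")
--         if master_serial and member.get("memberSn"):
--             if master_serial in devices:
--                 devices[master_serial].append(member)
--             else:
--                 devices[master_serial] = [member]
--
--     return devices
-- ===== SOURCE B (Python) =====
-- def order_members(members):
--     ok = [m for m in members if m.get("sn") and m.get("memberSn")]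
--     serials = list(dict.fromkeys(m["sn"] for m in ok))
--     return {s: [m for m in ok if m["sn"] == s] for s in serials}
-- ===== Notes on version B (the rewrite author's own statement) =====
-- stated objective: alternative
-- what changed: Replaces the single-pass hash-bucket grouping with filter once, dedup the serials in first-occurrence order, then build each group by a per-serial scan of the filtered list.
import Mathlib
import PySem

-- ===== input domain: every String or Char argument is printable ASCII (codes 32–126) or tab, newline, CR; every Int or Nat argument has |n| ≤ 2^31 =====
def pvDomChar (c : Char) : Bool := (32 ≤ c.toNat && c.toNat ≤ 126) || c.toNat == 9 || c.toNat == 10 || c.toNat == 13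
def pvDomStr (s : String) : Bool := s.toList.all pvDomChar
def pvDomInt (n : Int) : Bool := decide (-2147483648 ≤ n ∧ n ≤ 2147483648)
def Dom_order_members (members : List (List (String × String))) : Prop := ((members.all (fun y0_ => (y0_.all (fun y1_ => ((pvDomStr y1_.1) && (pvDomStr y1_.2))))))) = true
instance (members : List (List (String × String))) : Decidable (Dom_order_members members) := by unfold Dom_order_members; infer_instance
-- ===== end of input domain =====

-- B replaces A's single-pass hash-bucket grouping by: filter the qualifying members once,
-- dedup the serials in first-occurrence order, then build each group by a per-serial scan (alternative decomposition, same result).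


-- shared Python-semantics helpers: member.get(k) on an assoc-list dict, and Python truthiness of an Optional[str]
def pvGet (m : List (String × String)) (k : String) : Option String := (PySem.Dict.mk m).get? k
def pvTruthy (o : Option String) : Bool := match o with | some s => s != "" | none => false

-- ===== PORT A =====
def order_members (members : List (List (String × String))) : List (String × List (List (String × String))) :=
  (members.foldl (fun devices member =>
      let masterSerial := pvGet member "sn"
      if pvTruthy masterSerial && pvTruthy (pvGet member "memberSn") then
        let ms := masterSerial.getD ""
        if devices.contains ms then
          devices.modify ms [] (fun g => g ++ [member])
        else
          devices.insert ms [member]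
      else devices)
    PySem.Dict.empty).items

-- ===== PORT B =====
def order_members_alt (members : List (List (String × String))) : List (String × List (List (String × String))) :=
  let ok := members.filter (fun m => pvTruthy (pvGet m "sn") && pvTruthy (pvGet m "memberSn"))
  let serials := PySem.List.dedup (ok.map (fun m => (pvGet m "sn").getD ""))
  serials.map (fun s => (s, ok.filter (fun m => (pvGet m "sn").getD "" == s)))

-- ===== PRECONDITION & SPEC =====
def Spec_order_members (members : List (List (String × String))) (out : List (String × List (List (String × String)))) : Prop := out = order_members_alt members
instance (members : List (List (String × String))) (out : List (String × List (List (String × String)))) : Decidable (Spec_order_members members out) := by unfold Spec_order_members; infer_instance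

-- ===== CLAIM (what is proved, stated in full; the proofs are below) =====
def Claim_equal_order_members : Prop := ∀ (members : List (List (String × String))), Dom_order_members members → Spec_order_members members (order_members members)

-- ===== LEMMAS AND PROOFS =====

-- key of a qualifying member
def pvKey (m : List (String × String)) : String := (pvGet m "sn").getD ""

-- A's branch (append-or-insert) is exactly Dict.modify with default []
theorem pv_step_eq_modify (d : PySem.Dict String (List (List (String × String)))) (k : String)
    (m : List (String × String)) :
    (if d.contains k then d.modify k [] (fun g => g ++ [m]) else d.insert k [m])
      = d.modify k [] (fun g => g ++ [m]) := by
  by_cases h : d.contains k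
  · simp [h]
  · have hc : d.contains k = false := by simpa using h
    simp [PySem.Dict.modify, hc, PySem.Dict.getD_of_not_contains]

-- a fold whose step is the identity on non-qualifying elements is a fold over the filter
theorem pv_foldl_filter {α β : Type} (q : α → Bool) (step : β → α → β) :
    ∀ (l : List α) (d : β),
      l.foldl (fun d m => if q m then step d m else d) d = (l.filter q).foldl step d := by
  intro l
  induction l with
  | nil => intro d; rfl
  | cons x xs ih =>
    intro d
    by_cases h : q x <;> simp [h, ih]

-- keys of the grouping fold: the serials deduplicated in first-occurrence order
theorem pv_group_keys (ok : List (List (String × String))) :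
    (ok.foldl (fun d m => d.modify (pvKey m) [] (fun g => g ++ [m]))
        (PySem.Dict.empty : PySem.Dict String (List (List (String × String))))).keys
      = PySem.List.dedup (ok.map pvKey) := by
  rw [PySem.Dict.keys_foldl_modify_key]
  simp [PySem.Dict.keys_empty, PySem.List.dedup_eq_ofList, PySem.Set.ofList, PySem.Set.update]

-- each group of the grouping fold: the filter of ok by that serial
theorem pv_group_getD (ok : List (List (String × String))) (s : String) :
    (ok.foldl (fun d m => d.modify (pvKey m) [] (fun g => g ++ [m]))
        (PySem.Dict.empty : PySem.Dict String (List (List (String × String))))).getD s []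
      = ok.filter (fun m => pvKey m == s) := by
  have h := List.foldl_map (f := fun m : List (String × String) => (pvKey m, m))
      (g := fun (d : PySem.Dict String (List (List (String × String)))) p =>
        PySem.Dict.modify d p.1 [] (fun g => g ++ [p.2])) (l := ok) (init := PySem.Dict.empty)
  simp only at h
  rw [← h, PySem.Dict.getD_foldl_modify_append]
  simp [List.filter_map, Function.comp_def]

-- the grouping fold, characterised as dedup-keys mapped to filtered groups
theorem pv_group_fold (ok : List (List (String × String))) :
    (ok.foldl (fun d m => d.modify (pvKey m) [] (fun g => g ++ [m]))
        (PySem.Dict.empty : PySem.Dict String (List (List (String × String))))).items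
      = (PySem.List.dedup (ok.map pvKey)).map
          (fun s => (s, ok.filter (fun m => pvKey m == s))) := by
  have hnd : (ok.foldl (fun d m => d.modify (pvKey m) [] (fun g => g ++ [m]))
      (PySem.Dict.empty : PySem.Dict String (List (List (String × String))))).keys.Nodup := by
    apply PySem.Dict.nodup_keys_foldl_modify_key
    exact PySem.Dict.nodup_keys_empty
  rw [PySem.Dict.items_eq_map_keys _ hnd [], pv_group_keys]
  exact List.map_congr_left (fun s _ => by rw [pv_group_getD ok s])

-- ===== VERDICT (by name: the statement is the Claim_ definition above) =====
theorem order_members_spec : Claim_equal_order_members := by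
  intro members _
  unfold Spec_order_members order_members order_members_alt
  show (List.foldl
      (fun devices member =>
        if pvTruthy (pvGet member "sn") && pvTruthy (pvGet member "memberSn") then
          if devices.contains ((pvGet member "sn").getD "") then
            devices.modify ((pvGet member "sn").getD "") [] (fun g => g ++ [member])
          else
            devices.insert ((pvGet member "sn").getD "") [member]
        else devices)
      PySem.Dict.empty members).items
    = (PySem.List.dedup ((members.filter (fun m => pvTruthy (pvGet m "sn") && pvTruthy (pvGet m "memberSn"))).map
        (fun m => (pvGet m "sn").getD ""))).map
        (fun s => (s, (members.filter (fun m => pvTruthy (pvGet m "sn") && pvTruthy (pvGet m "memberSn"))).filter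
          (fun m => (pvGet m "sn").getD "" == s)))
  have hf := pv_foldl_filter (fun m => pvTruthy (pvGet m "sn") && pvTruthy (pvGet m "memberSn"))
      (fun (devices : PySem.Dict String (List (List (String × String)))) member =>
        if devices.contains ((pvGet member "sn").getD "") then
          devices.modify ((pvGet member "sn").getD "") [] (fun g => g ++ [member])
        else
          devices.insert ((pvGet member "sn").getD "") [member]) members PySem.Dict.empty
  simp only at hf
  rw [hf]
  have hstep : (fun (devices : PySem.Dict String (List (List (String × String)))) member =>
        if devices.contains ((pvGet member "sn").getD "") then
          devices.modify ((pvGet member "sn").getD "") [] (fun g => g ++ [member])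
        else
          devices.insert ((pvGet member "sn").getD "") [member])
      = (fun devices member => devices.modify (pvKey member) [] (fun g => g ++ [member])) := by
    funext d m
    exact pv_step_eq_modify d (pvKey m) m
  rw [hstep, pv_group_fold]
  rfl
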